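-- pv_equiv track=rewrite | github.com/pyodolski/smart-farm-project | routes/group.py | find_col_groups
-- ===== SOURCE A (Python) =====
-- def find_contiguous_segments(line):
--     segments = []
--     start = 0
--     val = line[0]
--     for i in range(1, len(line)):
--         if line[i] != val:
--             segments.append((start, i-1, val))  # (시작 인덱스, 끝 인덱스, 값)
--             start = i
--             val = line[i]
--     segments.append((start, len(line)-1, val))  # 마지막 세그먼트
--     return segments
--
-- def find_col_groups(grid):
--     groups = []
--     for col_idx in range(len(grid[0])):
--         col = [row[col_idx] for row in grid]
--         segments = find_contiguous_segments(col)
--         for start, end, val in segments: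
--             groups.append((start, col_idx, end, val))  # (시작 행, 열 인덱스, 끝 행, 값)
--     return groups
-- ===== SOURCE B (Python) =====
-- def find_col_groups(grid):
--     # single top-down sweep: one open (bucket, start, value) record per column,
--     # closed segments collected in per-column buckets, concatenated at the end
--     state = [([], 0, v) for v in grid[0]]
--     for r, row in enumerate(grid[1:], 1):
--         state = [(b + [(s, c, r - 1, v)], r, x) if x != v else (b, s, v)
--                  for c, ((b, s, v), x) in enumerate(zip(state, row))]
--     n = len(grid)
--     out = []
--     for c, (b, s, v) in enumerate(state):
--         out.extend(b + [(s, c, n - 1, v)])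
--     return out
-- ===== Notes on version B (the rewrite author's own statement) =====
-- stated objective: alternative
-- what changed: Replaces the column-extraction + per-column segment scan with a single top-down row sweep that keeps one open (bucket, start, value) record per column and concatenates the per-column buckets at the end; no column lists are materialised and no helper function is needed.
import Mathlib
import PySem

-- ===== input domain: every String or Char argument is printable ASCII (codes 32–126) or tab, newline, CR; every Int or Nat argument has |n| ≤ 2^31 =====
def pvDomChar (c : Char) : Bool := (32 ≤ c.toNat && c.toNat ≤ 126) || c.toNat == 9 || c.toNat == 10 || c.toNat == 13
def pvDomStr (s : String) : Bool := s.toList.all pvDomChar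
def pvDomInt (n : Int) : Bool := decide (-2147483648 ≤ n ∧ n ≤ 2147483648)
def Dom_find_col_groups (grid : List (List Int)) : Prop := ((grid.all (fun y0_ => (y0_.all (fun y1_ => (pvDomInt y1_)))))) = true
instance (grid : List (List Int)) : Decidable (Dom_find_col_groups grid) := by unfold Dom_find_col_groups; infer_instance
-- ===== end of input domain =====

-- B replaces A's column-extraction + per-column segment scan by a single top-down row sweep
-- keeping one open (bucket, start, value) record per column (alternative decomposition, same cost).

-- ===== PORT A =====
def find_contiguous_segments (line : List Int) : List (Int × Int × Int) :=
  let st : List (Int × Int × Int) × Int × Int := ([], 0, PySem.List.pyGetD line 0 0)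
  let r := (PySem.List.pyRange 1 (line.length : Int) 1).foldl
    (fun acc i =>
      if PySem.List.pyGetD line i 0 ≠ acc.2.2 then
        (acc.1 ++ [(acc.2.1, i - 1, acc.2.2)], i, PySem.List.pyGetD line i 0)
      else acc) st
  r.1 ++ [(r.2.1, (line.length : Int) - 1, r.2.2)]

def find_col_groups (grid : List (List Int)) : List (Int × Int × Int × Int) :=
  (PySem.List.pyRange 0 ((PySem.List.pyGetD grid 0 []).length : Int) 1).foldl
    (fun groups col_idx =>
      let col := grid.map (fun row => PySem.List.pyGetD row col_idx 0)
      let segments := find_contiguous_segments col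
      segments.foldl (fun g sev => g ++ [(sev.1, col_idx, sev.2.1, sev.2.2)]) groups) []

-- ===== PORT B =====
def find_col_groups_alt (grid : List (List Int)) : List (Int × Int × Int × Int) :=
  let init : List (List (Int × Int × Int × Int) × Int × Int) :=
    (PySem.List.pyGetD grid 0 []).map (fun v => ([], (0 : Int), v))
  let state := (PySem.List.enumerate (PySem.List.slice grid (some 1) none) 1).foldl
    (fun st rr =>
      (PySem.List.enumerate (st.zip rr.2) 0).map
        (fun p =>
          if p.2.2 ≠ p.2.1.2.2 then
            (p.2.1.1 ++ [(p.2.1.2.1, p.1, rr.1 - 1, p.2.1.2.2)], rr.1, p.2.2)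
          else p.2.1))
    init
  let n : Int := grid.length
  (PySem.List.enumerate state 0).foldl
    (fun out p => out ++ (p.2.1 ++ [(p.2.2.1, p.1, n - 1, p.2.2.2)])) []

-- ===== PRECONDITION & SPEC =====
-- Pre_ excludes exactly the inputs where A raises IndexError: the empty grid (grid[0]),
-- and grids where some row is shorter than row 0 (row[col_idx] in the column comprehension).
def Pre_find_col_groups (grid : List (List Int)) : Prop :=
  grid ≠ [] ∧ ∀ row ∈ grid, grid.headI.length ≤ row.length
instance (grid : List (List Int)) : Decidable (Pre_find_col_groups grid) := by
  unfold Pre_find_col_groups; infer_instance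
def pvWitness_find_col_groups : List (List Int) := [[1, 2], [1, 3], [2, 3]]

def Spec_find_col_groups (grid : List (List Int)) (out : List (Int × Int × Int × Int)) : Prop := out = find_col_groups_alt grid
instance (grid : List (List Int)) (out : List (Int × Int × Int × Int)) : Decidable (Spec_find_col_groups grid out) := by unfold Spec_find_col_groups; infer_instance

-- ===== CLAIM (what is proved, stated in full; the proofs are below) =====
def Claim_equal_find_col_groups : Prop := ∀ (grid : List (List Int)), Dom_find_col_groups grid → Pre_find_col_groups grid → Spec_find_col_groups grid (find_col_groups grid)

-- ===== LEMMAS AND PROOFS =====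

-- A's per-line scan, written structurally over the tail of the line (index i tracked explicitly).
def scan3 (xs : List Int) (i : Int) (acc : List (Int × Int × Int) × Int × Int) :
    List (Int × Int × Int) × Int × Int :=
  match xs with
  | [] => acc
  | x :: t =>
      scan3 t (i + 1)
        (if x ≠ acc.2.2 then (acc.1 ++ [(acc.2.1, i - 1, acc.2.2)], i, x) else acc)

-- B's per-column scan (bucket entries already carry the column index c).
def colScan (c : Int) (xs : List Int) (r : Int)
    (acc : List (Int × Int × Int × Int) × Int × Int) :
    List (Int × Int × Int × Int) × Int × Int :=
  match xs with
  | [] => acc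
  | x :: t =>
      colScan c t (r + 1)
        (if x ≠ acc.2.2 then (acc.1 ++ [(acc.2.1, c, r - 1, acc.2.2)], r, x) else acc)

theorem scan3_foldA (xs : List Int) (k : Nat) (acc : List (Int × Int × Int) × Int × Int) :
    (PySem.List.pyRange (k : Int) (xs.length : Int) 1).foldl
      (fun acc i =>
        if PySem.List.pyGetD xs i 0 ≠ acc.2.2 then
          (acc.1 ++ [(acc.2.1, i - 1, acc.2.2)], i, PySem.List.pyGetD xs i 0)
        else acc) acc
    = scan3 (xs.drop k) (k : Int) acc := by
  induction h : xs.length - k generalizing k acc with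
  | zero =>
      have hk : xs.length ≤ k := by omega
      rw [PySem.List.pyRange_one_eq_nil (by exact_mod_cast hk),
        List.drop_eq_nil_of_le hk]
      simp [scan3]
  | succ n ih =>
      have hk : k < xs.length := by omega
      rw [PySem.List.pyRange_one_cons (by exact_mod_cast hk),
        List.drop_eq_getElem_cons hk]
      simp only [List.foldl_cons, scan3]
      have hget : PySem.List.pyGetD xs (k : Int) 0 = xs[k] := by
        rw [PySem.List.pyGetD_natCast, List.getD_eq_getElem _ _ hk]
      have hcast : ((k : Int) + 1) = ((k + 1 : Nat) : Int) := by push_cast; ring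
      rw [hget, hcast, ih (k + 1) _ (by omega)]

theorem colScan_scan3 (c : Int) (xs : List Int) :
    ∀ (r : Int) (segs : List (Int × Int × Int)) (s v : Int),
    colScan c xs r (segs.map (fun t => (t.1, c, t.2.1, t.2.2)), s, v)
      = ((scan3 xs r (segs, s, v)).1.map (fun t => (t.1, c, t.2.1, t.2.2)),
         (scan3 xs r (segs, s, v)).2) := by
  induction xs with
  | nil => intro r segs s v; simp [colScan, scan3]
  | cons x t ih =>
      intro r segs s v
      by_cases hx : x = v
      · simp only [colScan, scan3, hx, ne_eq, not_true_eq_false, if_false]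
        simpa [hx] using ih (r + 1) segs s v
      · simp only [colScan, scan3, ne_eq, hx, not_false_iff, if_pos]
        rw [show segs.map (fun t => (t.1, c, t.2.1, t.2.2)) ++ [(s, c, r - 1, v)]
              = (segs ++ [(s, r - 1, v)]).map (fun t => (t.1, c, t.2.1, t.2.2)) by simp]
        exact ih (r + 1) (segs ++ [(s, r - 1, v)]) r x

-- B's row loop computes, per column c, exactly colScan over that column's tail values.
theorem B_loop (rows : List (List Int)) :
    ∀ (r : Int) (st : List (List (Int × Int × Int × Int) × Int × Int)),
    (∀ row ∈ rows, st.length ≤ row.length) →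
    (PySem.List.enumerate rows r).foldl
      (fun st rr =>
        (PySem.List.enumerate (st.zip rr.2) 0).map
          (fun p =>
            if p.2.2 ≠ p.2.1.2.2 then
              (p.2.1.1 ++ [(p.2.1.2.1, p.1, rr.1 - 1, p.2.1.2.2)], rr.1, p.2.2)
            else p.2.1))
      st
    = (List.range st.length).map
        (fun (c : Nat) => colScan (c : Int) (rows.map (fun row => row.getD c 0)) r
          (st.getD c ([], 0, 0))) := by
  induction rows with
  | nil =>
      intro r st _
      simp only [PySem.List.enumerate_nil, List.foldl_nil, List.map_nil, colScan]
      apply List.ext_getElem (by simp)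
      intro c h1 h2
      simp [List.getD_eq_getElem?_getD, List.getElem?_eq_getElem h1]
  | cons row rows ih =>
      intro r st hlen
      rw [PySem.List.enumerate_cons, List.foldl_cons]
      have hrow : st.length ≤ row.length := hlen row (by simp)
      set st' := (PySem.List.enumerate (st.zip row) 0).map
        (fun p =>
          if p.2.2 ≠ p.2.1.2.2 then
            (p.2.1.1 ++ [(p.2.1.2.1, p.1, r - 1, p.2.1.2.2)], r, p.2.2)
          else p.2.1) with hst'
      have hlen' : st'.length = st.length := by
        simp [hst', PySem.List.length_enumerate, Nat.min_eq_left hrow]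
      have hget' : ∀ c, c < st.length →
          st'.getD c ([], 0, 0)
            = (if row[c]! ≠ (st.getD c ([], 0, 0)).2.2 then
                ((st.getD c ([], 0, 0)).1 ++
                  [((st.getD c ([], 0, 0)).2.1, (c : Int), r - 1, (st.getD c ([], 0, 0)).2.2)],
                 r, row[c]!)
              else st.getD c ([], 0, 0)) := by
        intro c hc
        have hc' : c < st'.length := by omega
        have hcr : c < row.length := by omega
        have hcz : c < (st.zip row).length := by simp; omega
        rw [List.getD_eq_getElem _ _ hc', List.getD_eq_getElem _ _ hc]
        simp [hst', PySem.List.getElem_enumerate, List.getElem_zip,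
          getElem!_pos row c hcr]
      rw [ih (r + 1) st' (fun rw2 h => by rw [hlen']; exact hlen rw2 (by simp [h]))]
      rw [hlen']
      apply List.map_congr_left
      intro c hc
      have hc : c < st.length := List.mem_range.mp hc
      have hcr : c < row.length := by omega
      simp only [List.map_cons, colScan]
      rw [hget' c hc]
      by_cases hx : row[c] = (st.getD c ([], 0, 0)).2.2
      · have hx' : row[c]?.getD 0 = (st[c]?.getD ([], 0, 0)).2.2 := by
          simpa [List.getElem?_eq_getElem hcr, List.getElem?_eq_getElem hc,
            List.getD_eq_getElem?_getD] using hx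
        simp [getElem!_pos row c hcr, hx, hx']
      · have hx' : ¬ row[c]?.getD 0 = (st[c]?.getD ([], 0, 0)).2.2 := by
          simpa [List.getElem?_eq_getElem hcr, List.getElem?_eq_getElem hc,
            List.getD_eq_getElem?_getD] using hx
        simp [getElem!_pos row c hcr, hx']
        rw [if_neg (by simpa [List.getD_eq_getElem?_getD] using hx)]
        simp [List.getElem?_eq_getElem hcr]

theorem find_col_groups_eq_flatMap (g0 : List Int) (gs : List (List Int)) :
    find_col_groups (g0 :: gs)
    = (List.range g0.length).flatMap (fun (c : Nat) =>
        (find_contiguous_segments ((g0 :: gs).map (fun row => row.getD c 0))).map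
          (fun t => (t.1, (c : Int), t.2.1, t.2.2))) := by
  unfold find_col_groups
  rw [show PySem.List.pyGetD (g0 :: gs) 0 [] = g0 from PySem.List.pyGetD_zero_cons _ _ _]
  rw [PySem.List.pyRange_zero_nat]
  rw [List.foldl_map]
  induction (List.range g0.length) using List.reverseRecOn with
  | nil => simp
  | append_singleton l c ih =>
      rw [List.foldl_append, List.flatMap_append, ih]
      simp only [List.foldl_cons, List.foldl_nil, List.flatMap_cons, List.flatMap_nil,
        List.append_nil]
      rw [PySem.List.foldl_append_singleton_eq_map]
      congr 1
      congr 2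
      apply List.map_congr_left
      intro row _
      exact PySem.List.pyGetD_natCast row c 0

theorem flatMap_congr' {α β : Type} (l : List α) (f g : α → List β)
    (h : ∀ a ∈ l, f a = g a) : l.flatMap f = l.flatMap g := by
  induction l with
  | nil => rfl
  | cons x t ih =>
      simp only [List.flatMap_cons, h x (by simp),
        ih (fun a ha => h a (by simp [ha]))]

theorem find_col_groups_alt_eq_flatMap (g0 : List Int) (gs : List (List Int))
    (hlen : ∀ row ∈ gs, g0.length ≤ row.length) :
    find_col_groups_alt (g0 :: gs)
    = (List.range g0.length).flatMap (fun (c : Nat) =>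
        (colScan (c : Int) (gs.map (fun row => row.getD c 0)) 1 ([], 0, g0.getD c 0)).1 ++
        [((colScan (c : Int) (gs.map (fun row => row.getD c 0)) 1 ([], 0, g0.getD c 0)).2.1,
          (c : Int), ((g0 :: gs).length : Int) - 1,
          (colScan (c : Int) (gs.map (fun row => row.getD c 0)) 1 ([], 0, g0.getD c 0)).2.2)]) := by
  unfold find_col_groups_alt
  rw [show PySem.List.pyGetD (g0 :: gs) 0 [] = g0 from PySem.List.pyGetD_zero_cons _ _ _]
  rw [show PySem.List.slice (g0 :: gs) (some 1) none = gs by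
    rw [PySem.List.slice_from_one]; rfl]
  dsimp only
  rw [B_loop gs 1 (g0.map (fun v => ([], (0 : Int), v)))
    (fun row h => by simpa using hlen row h)]
  simp only [List.length_map]
  rw [PySem.List.foldl_append_eq_flatMap, List.nil_append]
  rw [show PySem.List.enumerate ((List.range g0.length).map
        (fun (c : Nat) => colScan (c : Int) (gs.map (fun row => row.getD c 0)) 1
          ((g0.map (fun v => ([], (0 : Int), v))).getD c ([], 0, 0))))
      = (List.range g0.length).map
        (fun (c : Nat) => ((c : Int), colScan (c : Int) (gs.map (fun row => row.getD c 0)) 1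
          ((g0.map (fun v => ([], (0 : Int), v))).getD c ([], 0, 0)))) by
    apply List.ext_getElem (by simp [PySem.List.length_enumerate])
    intro k h1 h2
    simp [PySem.List.getElem_enumerate]]
  rw [List.flatMap_map]
  apply flatMap_congr'
  intro c hcm
  have hc : c < g0.length := List.mem_range.mp hcm
  have hinit : (g0.map (fun v => (([] : List (Int × Int × Int × Int)), (0 : Int), v))).getD c ([], 0, 0)
      = ([], 0, g0.getD c 0) := by
    rw [List.getD_eq_getElem _ _ (by simpa using hc), List.getElem_map,
      List.getD_eq_getElem _ _ hc]
  rw [hinit]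

theorem fcs_eq (xs : List Int) :
    find_contiguous_segments xs
      = (scan3 (xs.drop 1) 1 ([], 0, PySem.List.pyGetD xs 0 0)).1 ++
        [((scan3 (xs.drop 1) 1 ([], 0, PySem.List.pyGetD xs 0 0)).2.1, (xs.length : Int) - 1,
          (scan3 (xs.drop 1) 1 ([], 0, PySem.List.pyGetD xs 0 0)).2.2)] := by
  unfold find_contiguous_segments
  dsimp only
  have h1 := fun acc => scan3_foldA xs 1 acc
  simp only [Nat.cast_one] at h1
  rw [h1]

-- ===== VERDICT (by name: the statement is the Claim_ definition above) =====
theorem find_col_groups_spec : Claim_equal_find_col_groups := by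
  intro grid _ hpre
  unfold Spec_find_col_groups
  obtain ⟨hne, hlen⟩ := hpre
  cases grid with
  | nil => exact absurd rfl hne
  | cons g0 gs =>
      have hlen' : ∀ row ∈ gs, g0.length ≤ row.length := fun row h => by
        simpa using hlen row (by simp [h])
      rw [find_col_groups_eq_flatMap, find_col_groups_alt_eq_flatMap g0 gs hlen']
      apply flatMap_congr'
      intro c hcm
      have hc : c < g0.length := List.mem_range.mp hcm
      rw [fcs_eq]
      rw [show ((g0 :: gs).map (fun row => row.getD c 0)).drop 1
            = gs.map (fun row => row.getD c 0) from rfl]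
      rw [show PySem.List.pyGetD ((g0 :: gs).map (fun row => row.getD c 0)) 0 0
            = g0.getD c 0 from PySem.List.pyGetD_zero_cons _ _ _]
      rw [show (colScan (c : Int) (gs.map (fun row => row.getD c 0)) 1 ([], 0, g0.getD c 0))
            = ((scan3 (gs.map (fun row => row.getD c 0)) 1 ([], 0, g0.getD c 0)).1.map
                (fun t => (t.1, (c : Int), t.2.1, t.2.2)),
               (scan3 (gs.map (fun row => row.getD c 0)) 1 ([], 0, g0.getD c 0)).2) by
        simpa using colScan_scan3 (c : Int) (gs.map (fun row => row.getD c 0)) 1 [] 0 (g0.getD c 0)]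
      simp
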